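-- pv_equiv track=rewrite | github.com/brandoncox/fatigue-demo | shift-api/agents.py | _count_hesitations
-- ===== SOURCE A (Python) =====
-- from typing import List, Dict, Any
--
-- def _count_hesitations(transcription_doc: Dict) -> int:
--     """Count hesitation markers (um, uh, er, ah) in controller speech"""
--     fillers = ["uh", "um", "er", "ah", "..."]
--     count = 0
--     segments = transcription_doc.get("segments", [])
--
--     for segment in segments:
--         if segment.get("speaker") == "controller":
--             text = (segment.get("text") or "").lower()
--             count += sum(text.count(filler) for filler in fillers)
--
--     return count
-- ===== SOURCE B (Python) =====
-- def _count_hesitations(transcription_doc):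
--     """Count hesitation markers (um, uh, er, ah) in controller speech.
--
--     Single character-level scan per controller text instead of per-filler
--     substring counts: the two-letter fillers never self-overlap (their two
--     characters differ), so each occurrence is just an adjacent character
--     pair; and non-overlapping occurrences of "..." are exactly run_len // 3
--     for each maximal run of dots.
--     """
--     pair_fillers = ("uh", "um", "er", "ah")
--     total = 0
--     for segment in transcription_doc.get("segments", []):
--         if segment.get("speaker") == "controller":
--             text = (segment.get("text") or "").lower()
--             run = 0
--             for i, c in enumerate(text):
--                 if c == ".":
--                     run += 1
--                 else:
--                     total += run // 3
--                     run = 0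
--                 if i + 1 < len(text) and c + text[i + 1] in pair_fillers:
--                     total += 1
--             total += run // 3
--     return total
-- ===== Notes on version B (the rewrite author's own statement) =====
-- stated objective: alternative
-- what changed: A calls str.count for each of 5 filler substrings per segment; B makes one character-level scan per controller text, counting adjacent-pair matches for the two-letter fillers (which cannot self-overlap) and computing '...' occurrences as run_length//3 over maximal dot runs, with no substring-count calls at all.
import Mathlib
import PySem

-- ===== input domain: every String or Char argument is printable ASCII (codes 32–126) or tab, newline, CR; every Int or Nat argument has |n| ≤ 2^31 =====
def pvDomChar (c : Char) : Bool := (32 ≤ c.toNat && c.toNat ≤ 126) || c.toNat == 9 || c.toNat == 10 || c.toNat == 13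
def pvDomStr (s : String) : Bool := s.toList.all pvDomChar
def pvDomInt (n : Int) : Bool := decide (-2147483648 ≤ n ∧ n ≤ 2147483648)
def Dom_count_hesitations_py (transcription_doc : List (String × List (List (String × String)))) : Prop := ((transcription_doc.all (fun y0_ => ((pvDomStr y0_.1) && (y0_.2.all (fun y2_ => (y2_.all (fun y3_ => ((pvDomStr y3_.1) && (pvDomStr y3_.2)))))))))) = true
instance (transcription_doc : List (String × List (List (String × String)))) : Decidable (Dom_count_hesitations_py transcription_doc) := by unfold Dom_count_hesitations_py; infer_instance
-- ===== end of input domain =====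

-- B replaces A's five per-segment str.count calls by one character-level scan per controller
-- text: adjacent-pair matches for the two-letter fillers plus run_length // 3 per maximal dot
-- run for "..." (objective: alternative algorithm, same behaviour).

-- ===== PORT A =====
-- segment-major loop: for each controller segment, sum the filler counts in its lowercased text
def count_hesitations_py (transcription_doc : List (String × List (List (String × String)))) : Int :=
  let fillers : List String := ["uh", "um", "er", "ah", "..."]
  let segments := (PySem.Dict.mk transcription_doc).getD "segments" []
  segments.foldl (fun count segment =>
    if (PySem.Dict.mk segment).get? "speaker" == some "controller" then
      let text := PySem.Str.lower (((PySem.Dict.mk segment).get? "text").getD "")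
      count + (fillers.map (fun filler => (PySem.Str.count text filler : Int))).sum
    else count) 0

-- ===== PORT B =====
-- 'c + text[i+1] in pair_fillers' from Source B
def pvIsPair (c d : Char) : Bool := (["uh", "um", "er", "ah"] : List String).contains (String.ofList [c, d])

-- Source B's inner 'for i, c in enumerate(text)' loop with its lookahead text[i+1], as structural
-- recursion: c is the current char, d (when present) is text[i+1]; total and run are the
-- Python locals (run // 3 is Python floor division); the last iteration (no lookahead)
-- and the loop exit (total += run // 3) are the one- and zero-element patterns
def pvScan (chars : List Char) (total : Int) (run : Int) : Int :=
  match chars with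
  | [] => total + PySem.Int.floordiv run 3
  | c :: [] =>
    if c = '.' then pvScan [] total (run + 1)
    else pvScan [] (total + PySem.Int.floordiv run 3) 0
  | c :: d :: t =>
    if c = '.' then
      pvScan (d :: t) (if pvIsPair c d then total + 1 else total) (run + 1)
    else
      pvScan (d :: t)
        (if pvIsPair c d then (total + PySem.Int.floordiv run 3) + 1
         else total + PySem.Int.floordiv run 3) 0

def count_hesitations_py_alt (transcription_doc : List (String × List (List (String × String)))) : Int :=
  ((PySem.Dict.mk transcription_doc).getD "segments" []).foldl (fun total segment =>
    if (PySem.Dict.mk segment).get? "speaker" == some "controller" then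
      pvScan (PySem.Str.lower (((PySem.Dict.mk segment).get? "text").getD "")).toList total 0
    else total) 0

-- ===== PRECONDITION & SPEC =====
def Spec_count_hesitations_py (transcription_doc : List (String × List (List (String × String)))) (out : Int) : Prop := out = count_hesitations_py_alt transcription_doc
instance (transcription_doc : List (String × List (List (String × String)))) (out : Int) : Decidable (Spec_count_hesitations_py transcription_doc out) := by unfold Spec_count_hesitations_py; infer_instance

-- ===== CLAIM (what is proved, stated in full; the proofs are below) =====
def Claim_equal_count_hesitations_py : Prop := ∀ (transcription_doc : List (String × List (List (String × String)))), Dom_count_hesitations_py transcription_doc → Spec_count_hesitations_py transcription_doc (count_hesitations_py transcription_doc)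

-- ===== LEMMAS AND PROOFS =====

-- structural (fuel-free) version of Python's greedy non-overlapping substring count
def cnt (f : List Char) (s : List Char) : Nat :=
  match s with
  | [] => 0
  | c :: t =>
    if h : f.isPrefixOf (c :: t) = true ∧ f ≠ [] then
      1 + cnt f (List.drop f.length (c :: t))
    else
      cnt f t
termination_by s.length
decreasing_by
  · have hf : 1 ≤ f.length := by
      cases f with
      | nil => exact absurd rfl h.2
      | cons a as => simp
    simp only [List.length_drop, List.length_cons]
    omega
  · simp

theorem go_eq_cnt (f : List Char) (hf : f ≠ []) :
    ∀ (fuel : Nat) (s : List Char) (acc : Nat), s.length ≤ fuel →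
      PySem.Chars.count.go f fuel s acc = acc + cnt f s := by
  intro fuel
  induction fuel with
  | zero =>
    intro s acc h
    have : s = [] := by cases s <;> simp_all
    subst this
    simp [PySem.Chars.count.go, cnt]
  | succ n ih =>
    intro s acc h
    cases s with
    | nil => simp [PySem.Chars.count.go, cnt]
    | cons c t =>
      simp only [PySem.Chars.count.go]
      by_cases hp : f.isPrefixOf (c :: t) = true
      · rw [if_pos hp]
        have h1 : (List.drop f.length (c :: t)).length ≤ n := by
          have hf1 : 1 ≤ f.length := by
            cases f with
            | nil => exact absurd rfl hf
            | cons a as => simp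
          simp only [List.length_drop, List.length_cons]
          simp only [List.length_cons] at h
          omega
        rw [ih _ _ h1]
        rw [cnt]
        rw [dif_pos ⟨hp, hf⟩]
        omega
      · rw [if_neg hp]
        have h1 : t.length ≤ n := by simp only [List.length_cons] at h; omega
        rw [ih _ _ h1]
        rw [cnt]
        rw [dif_neg (by simp [hp])]

theorem count_eq_cnt (s f : List Char) (hf : f ≠ []) : PySem.Chars.count s f = cnt f s := by
  unfold PySem.Chars.count
  rw [if_neg (by simp [hf])]
  simpa using go_eq_cnt f hf s.length s 0 le_rfl

-- single-pair occurrence count (spec-side)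
def pc (a b : Char) : List Char → Nat
  | [] => 0
  | c :: rest => (if c = a ∧ rest.head? = some b then 1 else 0) + pc a b rest

-- all four two-letter fillers at once (what B's pair check counts)
def pcAll : List Char → Nat
  | [] => 0
  | c :: rest => (match rest with | d :: _ => if pvIsPair c d then 1 else 0 | [] => 0) + pcAll rest

-- B's dot-run accumulator (spec-side, Nat run)
def dl : List Char → Nat → Nat
  | [], run => run / 3
  | c :: rest, run => if c = '.' then dl rest (run + 1) else run / 3 + dl rest 0

theorem pc_nil (a b : Char) : pc a b [] = 0 := rfl
theorem pc_cons (a b c : Char) (rest : List Char) :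
    pc a b (c :: rest) = (if c = a ∧ rest.head? = some b then 1 else 0) + pc a b rest := rfl
theorem pcAll_nil : pcAll [] = 0 := rfl
theorem pcAll_singleton (c : Char) : pcAll [c] = 0 := rfl
theorem pcAll_cons_cons (c d : Char) (t : List Char) :
    pcAll (c :: d :: t) = (if pvIsPair c d then 1 else 0) + pcAll (d :: t) := rfl
theorem dl_nil (r : Nat) : dl [] r = r / 3 := rfl
theorem dl_cons (c : Char) (rest : List Char) (r : Nat) :
    dl (c :: rest) r = if c = '.' then dl rest (r + 1) else r / 3 + dl rest 0 := rfl

theorem pvIsPair_iff (c d : Char) : pvIsPair c d = true ↔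
    (c = 'u' ∧ d = 'h') ∨ (c = 'u' ∧ d = 'm') ∨ (c = 'e' ∧ d = 'r') ∨ (c = 'a' ∧ d = 'h') := by
  simp [pvIsPair, List.contains_eq_mem, List.mem_cons, String.ext_iff]

-- a two-letter filler with distinct letters cannot self-overlap:
-- Python's non-overlapping count is the adjacent-pair count
theorem pair_eq (a b : Char) (hab : a ≠ b) :
    ∀ (n : Nat) (s : List Char), s.length ≤ n → cnt [a, b] s = pc a b s := by
  intro n
  induction n with
  | zero =>
    intro s h
    have : s = [] := by cases s <;> simp_all
    subst this; simp [cnt, pc]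
  | succ n ih =>
    intro s h
    cases s with
    | nil => simp [cnt, pc]
    | cons c t =>
      cases t with
      | nil =>
        rw [cnt, dif_neg (by simp [List.isPrefixOf])]
        simp [cnt, pc]
      | cons d t' =>
        by_cases hm : a = c ∧ b = d
        · obtain ⟨h1, h2⟩ := hm
          subst h1; subst h2
          rw [cnt, dif_pos (by simp [List.isPrefixOf])]
          rw [show List.drop [a, b].length (a :: b :: t') = t' from by simp]
          rw [pc_cons, pc_cons]
          rw [if_pos ⟨rfl, rfl⟩]
          rw [if_neg (fun hx => hab hx.1.symm)]
          rw [ih t' (by simp only [List.length_cons] at h; omega)]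
          omega
        · rw [cnt, dif_neg (by simp [List.isPrefixOf]; intro h1 h2; exact hm ⟨h1, h2⟩)]
          rw [pc_cons]
          rw [if_neg (by simp only [List.head?_cons, Option.some.injEq]
                         rintro ⟨rfl, rfl⟩; exact hm ⟨rfl, rfl⟩)]
          rw [zero_add]
          exact ih (d :: t') (by simp only [List.length_cons] at h ⊢; omega)

-- B's membership test counts exactly the four individual pairs
theorem pcAll_split (s : List Char) :
    pcAll s = pc 'u' 'h' s + pc 'u' 'm' s + pc 'e' 'r' s + pc 'a' 'h' s := by
  induction s with
  | nil => simp [pcAll_nil, pc_nil]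
  | cons c rest ih =>
    cases rest with
    | nil => simp [pcAll_singleton, pc_cons, pc_nil]
    | cons d t =>
      have hind : (if pvIsPair c d then 1 else 0)
          = (if c = 'u' ∧ (d :: t).head? = some 'h' then 1 else 0)
          + (if c = 'u' ∧ (d :: t).head? = some 'm' then 1 else 0)
          + (if c = 'e' ∧ (d :: t).head? = some 'r' then 1 else 0)
          + (if c = 'a' ∧ (d :: t).head? = some 'h' then 1 else 0) := by
        simp only [List.head?_cons, Option.some.injEq]
        by_cases hp : pvIsPair c d = true
        · rcases (pvIsPair_iff c d).mp hp with ⟨rfl, rfl⟩ | ⟨rfl, rfl⟩ | ⟨rfl, rfl⟩ | ⟨rfl, rfl⟩ <;>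
            rw [if_pos hp] <;> decide
        · rw [if_neg hp,
              if_neg (fun hx => hp ((pvIsPair_iff c d).mpr (Or.inl hx))),
              if_neg (fun hx => hp ((pvIsPair_iff c d).mpr (Or.inr (Or.inl hx)))),
              if_neg (fun hx => hp ((pvIsPair_iff c d).mpr (Or.inr (Or.inr (Or.inl hx))))),
              if_neg (fun hx => hp ((pvIsPair_iff c d).mpr (Or.inr (Or.inr (Or.inr hx)))))]
      rw [pcAll_cons_cons, ih, hind,
          pc_cons 'u' 'h' c (d :: t), pc_cons 'u' 'm' c (d :: t),
          pc_cons 'e' 'r' c (d :: t), pc_cons 'a' 'h' c (d :: t)]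
      ring

theorem cnt3_cons_dots (t : List Char) :
    cnt ['.', '.', '.'] ('.' :: '.' :: '.' :: t) = 1 + cnt ['.', '.', '.'] t := by
  rw [cnt, dif_pos (by simp [List.isPrefixOf])]
  simp

theorem cnt3_cons_ne (c : Char) (t : List Char) (h : c ≠ '.') :
    cnt ['.', '.', '.'] (c :: t) = cnt ['.', '.', '.'] t := by
  rw [cnt, dif_neg (by simp [List.isPrefixOf, Ne.symm h])]

theorem cnt3_one_dot (c : Char) (t : List Char) (h : c ≠ '.') :
    cnt ['.', '.', '.'] ('.' :: c :: t) = cnt ['.', '.', '.'] (c :: t) := by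
  rw [cnt, dif_neg (by simp [List.isPrefixOf, Ne.symm h])]

theorem cnt3_two_dots (c : Char) (t : List Char) (h : c ≠ '.') :
    cnt ['.', '.', '.'] ('.' :: '.' :: c :: t) = cnt ['.', '.', '.'] (c :: t) := by
  rw [cnt, dif_neg (by simp [List.isPrefixOf, Ne.symm h])]
  exact cnt3_one_dot c t h

theorem cnt3_replicate : ∀ (r : Nat), cnt ['.', '.', '.'] (List.replicate r '.') = r / 3
  | 0 => by simp [cnt]
  | 1 => by
    rw [show List.replicate 1 '.' = ['.'] from rfl]
    rw [cnt, dif_neg (by simp [List.isPrefixOf])]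
    simp [cnt]
  | 2 => by
    rw [show List.replicate 2 '.' = ['.', '.'] from rfl]
    rw [cnt, dif_neg (by simp [List.isPrefixOf])]
    rw [cnt, dif_neg (by simp [List.isPrefixOf])]
    simp [cnt]
  | (m + 3) => by
    rw [show List.replicate (m + 3) '.' = '.' :: '.' :: '.' :: List.replicate m '.' from by
      simp [List.replicate]]
    rw [cnt3_cons_dots, cnt3_replicate m]
    omega

-- a maximal run of r dots before a non-dot contributes r / 3 matches of "..."
theorem cnt3_replicate_append : ∀ (r : Nat) (c : Char) (t : List Char), c ≠ '.' →
    cnt ['.', '.', '.'] (List.replicate r '.' ++ c :: t) = r / 3 + cnt ['.', '.', '.'] (c :: t)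
  | 0, c, t, h => by simp
  | 1, c, t, h => by
    rw [show List.replicate 1 '.' ++ c :: t = '.' :: c :: t from rfl]
    rw [cnt3_one_dot c t h]
    omega
  | 2, c, t, h => by
    rw [show List.replicate 2 '.' ++ c :: t = '.' :: '.' :: c :: t from rfl]
    rw [cnt3_two_dots c t h]
    omega
  | (m + 3), c, t, h => by
    rw [show List.replicate (m + 3) '.' ++ c :: t
          = '.' :: '.' :: '.' :: (List.replicate m '.' ++ c :: t) from by simp [List.replicate]]
    rw [cnt3_cons_dots, cnt3_replicate_append m c t h]
    omega

-- B's dot-run accumulator computes Python's count of "..." over the pending run plus the rest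
theorem dl_eq : ∀ (s : List Char) (r : Nat),
    dl s r = cnt ['.', '.', '.'] (List.replicate r '.' ++ s) := by
  intro s
  induction s with
  | nil => intro r; simp [dl_nil, cnt3_replicate]
  | cons c t ih =>
    intro r
    by_cases hc : c = '.'
    · subst hc
      rw [dl_cons, if_pos rfl, ih (r + 1)]
      rw [show List.replicate (r + 1) '.' ++ t = List.replicate r '.' ++ '.' :: t from by
        rw [List.replicate_succ']; simp]
    · rw [dl_cons, if_neg hc, ih 0]
      rw [cnt3_replicate_append r c t hc, cnt3_cons_ne c t hc]
      simp

-- splitting B's single scan into its pair part and its dot-run part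
theorem scan_split : ∀ (chars : List Char) (total : Int) (r : Nat),
    pvScan chars total (r : Int) = total + ((pcAll chars + dl chars r : Nat) : Int) := by
  intro chars
  induction chars with
  | nil =>
    intro total r
    have h3 : PySem.Int.floordiv (r : Int) 3 = ((r / 3 : Nat) : Int) := by
      exact_mod_cast PySem.Int.floordiv_natCast r 3
    simp only [pvScan]
    rw [h3, pcAll_nil, dl_nil]
    push_cast
    ring
  | cons c rest ih =>
    intro total r
    have h3 : PySem.Int.floordiv (r : Int) 3 = ((r / 3 : Nat) : Int) := by
      exact_mod_cast PySem.Int.floordiv_natCast r 3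
    have h31 : PySem.Int.floordiv ((r : Int) + 1) 3 = (((r + 1) / 3 : Nat) : Int) := by
      rw [show ((r : Int) + 1) = ((r + 1 : Nat) : Int) from by push_cast; ring]
      exact_mod_cast PySem.Int.floordiv_natCast (r + 1) 3
    have h30 : PySem.Int.floordiv (0 : Int) 3 = ((0 / 3 : Nat) : Int) := by
      exact_mod_cast PySem.Int.floordiv_natCast 0 3
    cases rest with
    | nil =>
      simp only [pvScan]
      rw [pcAll_singleton, dl_cons, dl_nil, dl_nil]
      by_cases hc : c = '.'
      · rw [if_pos hc, if_pos hc, h31]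
        push_cast
        ring
      · rw [if_neg hc, if_neg hc, h3, h30]
        push_cast
        ring
    | cons d t =>
      simp only [pvScan]
      rw [pcAll_cons_cons, dl_cons]
      by_cases hc : c = '.'
      · rw [if_pos hc, if_pos hc]
        rw [show ((r : Int) + 1) = ((r + 1 : Nat) : Int) from by push_cast; ring]
        by_cases hp : pvIsPair c d = true
        · rw [if_pos hp, if_pos hp, ih]
          push_cast
          ring
        · rw [if_neg hp, if_neg hp, ih]
          push_cast
          ring
      · rw [if_neg hc, if_neg hc, h3,
            show ((0 : Int)) = ((0 : Nat) : Int) from rfl, ih]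
        by_cases hp : pvIsPair c d = true
        · rw [if_pos hp, if_pos hp]
          push_cast
          ring
        · rw [if_neg hp, if_neg hp]
          push_cast
          ring

-- per controller text: A's five substring counts = B's single scan
theorem per_text (text : String) (acc : Int) :
    acc + ((["uh", "um", "er", "ah", "..."].map
        (fun filler => (PySem.Str.count text filler : Int))).sum)
      = pvScan text.toList acc 0 := by
  have hscan := scan_split text.toList acc 0
  rw [show ((0 : Nat) : Int) = (0 : Int) from rfl] at hscan
  rw [hscan]
  simp only [List.map_cons, List.map_nil, List.sum_cons, List.sum_nil]
  rw [PySem.Str.count_eq, PySem.Str.count_eq, PySem.Str.count_eq, PySem.Str.count_eq,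
      PySem.Str.count_eq]
  rw [show ("uh" : String).toList = ['u', 'h'] from rfl,
      show ("um" : String).toList = ['u', 'm'] from rfl,
      show ("er" : String).toList = ['e', 'r'] from rfl,
      show ("ah" : String).toList = ['a', 'h'] from rfl,
      show ("..." : String).toList = ['.', '.', '.'] from rfl]
  rw [count_eq_cnt _ _ (by decide), count_eq_cnt _ _ (by decide), count_eq_cnt _ _ (by decide),
      count_eq_cnt _ _ (by decide), count_eq_cnt _ _ (by decide)]
  rw [pair_eq 'u' 'h' (by decide) text.toList.length text.toList le_rfl,
      pair_eq 'u' 'm' (by decide) text.toList.length text.toList le_rfl,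
      pair_eq 'e' 'r' (by decide) text.toList.length text.toList le_rfl,
      pair_eq 'a' 'h' (by decide) text.toList.length text.toList le_rfl]
  have hdl : dl text.toList 0 = cnt ['.', '.', '.'] text.toList := by
    rw [dl_eq]; simp
  rw [pcAll_split, hdl]
  push_cast
  ring

-- ===== VERDICT (by name: the statement is the Claim_ definition above) =====
theorem count_hesitations_py_spec : Claim_equal_count_hesitations_py := by
  intro doc _
  unfold Spec_count_hesitations_py count_hesitations_py count_hesitations_py_alt
  simp only []
  apply PySem.List.foldl_congr_mem
  intro acc seg _
  by_cases hs : ((PySem.Dict.mk seg).get? "speaker" == some "controller") = true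
  · rw [if_pos hs, if_pos hs]
    exact per_text _ acc
  · rw [if_neg hs, if_neg hs]
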